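-- pv_equiv track=rewrite | github.com/JuniorDevNam/Python | Lớp 11/Bài tập/baitoan.py | cau2
-- ===== SOURCE A (Python) =====
-- def cau2(a):
--     count = 0
--     tong = 0
--     for x in a:
--         if x > 0:
--             count += 1
--             tong = tong + x
--     return count, tong
-- ===== SOURCE B (Python) =====
-- def cau2(a):
--     s = sorted(a, reverse=True)
--     k = 0
--     while k < len(s) and s[k] > 0:
--         k += 1
--     head = s[:k]
--     return k, sum(head)
-- ===== Notes on version B (the rewrite author's own statement) =====
-- stated objective: alternative
-- what changed: B sorts the list in descending order so the positives form a contiguous prefix, finds the prefix boundary k by scanning the sorted list, and returns (k, sum of that prefix), instead of A's single fused pass accumulating count and sum over the original order.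
import Mathlib
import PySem

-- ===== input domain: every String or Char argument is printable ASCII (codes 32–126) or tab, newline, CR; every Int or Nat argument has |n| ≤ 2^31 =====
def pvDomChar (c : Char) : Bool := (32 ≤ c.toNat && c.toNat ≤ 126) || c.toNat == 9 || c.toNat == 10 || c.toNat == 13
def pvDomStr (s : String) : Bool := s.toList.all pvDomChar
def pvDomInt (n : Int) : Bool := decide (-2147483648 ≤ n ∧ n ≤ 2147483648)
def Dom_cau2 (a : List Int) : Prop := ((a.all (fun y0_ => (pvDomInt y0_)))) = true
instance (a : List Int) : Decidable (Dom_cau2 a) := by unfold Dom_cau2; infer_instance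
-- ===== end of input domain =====

-- B: sort descending so positives are a contiguous prefix, scan for the boundary k, return (k, sum of prefix) — alternative sort-based algorithm, same return value.


-- ===== PORT A =====
def cau2 (a : List Int) : Int × Int :=
  a.foldl (fun st x => if x > 0 then (st.1 + 1, st.2 + x) else st) (0, 0)

-- ===== PORT B =====
-- the 'while k < len(s) and s[k] > 0: k += 1' boundary scan, as structural recursion from the front
def cau2AltScan : List Int → Nat
  | [] => 0
  | x :: t => if x > 0 then cau2AltScan t + 1 else 0

def cau2_alt (a : List Int) : Int × Int :=
  let s := PySem.List.sorted a (fun x => x) true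
  let k := cau2AltScan s
  let head := PySem.List.slice s none (some (k : Int))
  ((k : Int), head.sum)

-- ===== PRECONDITION & SPEC =====
def Spec_cau2 (a : List Int) (out : Int × Int) : Prop := out = cau2_alt a
instance (a : List Int) (out : Int × Int) : Decidable (Spec_cau2 a out) := by unfold Spec_cau2; infer_instance

-- ===== CLAIM (what is proved, stated in full; the proofs are below) =====
def Claim_equal_cau2 : Prop := ∀ (a : List Int), Dom_cau2 a → Spec_cau2 a (cau2 a)

-- ===== LEMMAS AND PROOFS =====
theorem cau2_foldl (a : List Int) (c t : Int) :
    a.foldl (fun st x => if x > 0 then (st.1 + 1, st.2 + x) else st) (c, t) =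
      (c + ((a.filter (fun x => x > 0)).length : Int),
       t + (a.filter (fun x => x > 0)).sum) := by
  induction a generalizing c t with
  | nil => simp
  | cons x xs ih =>
    simp only [List.foldl, List.filter]
    by_cases h : x > 0
    · simp [h, ih]; constructor <;> ring
    · simp [h, ih]

-- on a descending list the boundary scan reaches exactly the positives, which are all of them
theorem scan_take_eq_filter (s : List Int) (hs : s.Pairwise (fun a b => b ≤ a)) :
    cau2AltScan s = (s.filter (fun x => x > 0)).length ∧
      s.take (cau2AltScan s) = s.filter (fun x => x > 0) := by
  induction s with
  | nil => simp [cau2AltScan]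
  | cons x t ih =>
    rcases List.pairwise_cons.mp hs with ⟨hx, ht⟩
    rcases ih ht with ⟨ih1, ih2⟩
    by_cases h : x > 0
    · have hfc : List.filter (fun y => decide (y > 0)) (x :: t)
          = x :: List.filter (fun y => decide (y > 0)) t := by simp [h]
      refine ⟨?_, ?_⟩
      · simp [cau2AltScan, h, ih1, hfc]
      · rw [hfc, cau2AltScan, if_pos h, List.take_succ_cons, ih2]
    · have hnil : t.filter (fun x => x > 0) = [] := by
        apply List.filter_eq_nil_iff.mpr
        intro y hy
        have := hx y hy
        simp only [decide_eq_true_eq]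
        omega
      simp [cau2AltScan, List.filter, h, hnil]

theorem cau2_spec : Claim_equal_cau2 := by
  intro a _
  unfold Spec_cau2 cau2 cau2_alt
  set s := PySem.List.sorted a (fun x => x) true with hsdef
  have hperm : s.Perm a := PySem.List.sorted_perm a (fun x => x) true
  have hpair : s.Pairwise (fun a b => b ≤ a) := PySem.List.sorted_pairwise_rev a (fun x => x)
  rcases scan_take_eq_filter s hpair with ⟨h1, h2⟩
  have hfp : (s.filter (fun x => x > 0)).Perm (a.filter (fun x => x > 0)) := hperm.filter _
  have h2' : List.take ((List.filter (fun x => decide (x > 0)) s).length) s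
      = List.filter (fun x => decide (x > 0)) s := h1 ▸ h2
  simp only [cau2_foldl, PySem.List.slice_to_natCast]
  rw [h1, h2']
  refine Prod.ext ?_ ?_
  · simp [hfp.length_eq]
  · simp [hfp.sum_eq]
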